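-- pv_equiv track=rewrite | github.com/jong129/team2_python | chatbot.py | make_context_from_hits
-- ===== SOURCE A (Python) =====
-- from typing import List, Dict, Any, Optional, Tuple
--
-- def make_context_from_hits(hits: List[Dict[str, Any]], max_chars: int = 3500) -> str:
--     chunks, total = [], 0                              # max_chars로 길이 제한 (모델 토큰 초과 방지)
--     for h in hits:
--         t = (h.get("text") or "").strip()
--         if not t:
--             continue
--         piece = f"- {t}"
--         if total + len(piece) > max_chars:
--             break
--         chunks.append(piece)
--         total += len(piece)
--     return "\n".join(chunks)
-- ===== SOURCE B (Python) =====
-- from itertools import accumulate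
--
-- def make_context_from_hits(hits, max_chars=3500):
--     # Pass 1: build all candidate pieces.
--     pieces = []
--     for h in hits:
--         t = (h.get("text") or "").strip()
--         if t:
--             pieces.append("- " + t)
--     # Pass 2: prefix-sum cutoff — count the leading pieces whose running total fits.
--     cutoff = 0
--     for total in accumulate(map(len, pieces)):
--         if total > max_chars:
--             break
--         cutoff += 1
--     return "\n".join(pieces[:cutoff])
-- ===== Notes on version B (the rewrite author's own statement) =====
-- stated objective: alternative
-- what changed: B splits A's single break-carrying accumulation loop into two passes: it first builds all candidate pieces, then finds the cutoff index via a running prefix sum (itertools.accumulate) and joins the fitting prefix.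
import Mathlib
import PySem

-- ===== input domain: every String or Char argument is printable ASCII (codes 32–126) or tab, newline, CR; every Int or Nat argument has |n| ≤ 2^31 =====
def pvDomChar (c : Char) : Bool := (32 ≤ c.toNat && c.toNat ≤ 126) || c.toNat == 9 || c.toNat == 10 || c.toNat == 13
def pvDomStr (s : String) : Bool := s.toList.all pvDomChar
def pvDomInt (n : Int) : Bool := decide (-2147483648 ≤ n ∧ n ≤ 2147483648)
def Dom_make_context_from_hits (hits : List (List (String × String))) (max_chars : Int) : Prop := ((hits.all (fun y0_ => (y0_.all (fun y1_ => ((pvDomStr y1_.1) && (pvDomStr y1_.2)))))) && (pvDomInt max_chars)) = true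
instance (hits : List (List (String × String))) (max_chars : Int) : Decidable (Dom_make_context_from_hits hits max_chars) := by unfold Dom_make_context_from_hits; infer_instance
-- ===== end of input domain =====

-- ===== PORT A =====
-- A: one loop accumulating chunks and a running total, breaking at the first over-limit piece.
def pvALoop (hits : List (List (String × String))) (mc : Int)
    (chunks : List String) (total : Int) : List String :=
  match hits with
  | [] => chunks
  | h :: rest =>
    let t := PySem.Str.strip ((PySem.Dict.mk h).getD "text" "")
    if t = "" then pvALoop rest mc chunks total
    else
      let piece := "- " ++ t
      if total + (PySem.Str.len piece : Int) > mc then chunks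
      else pvALoop rest mc (chunks ++ [piece]) (total + (PySem.Str.len piece : Int))

def make_context_from_hits (hits : List (List (String × String))) (max_chars : Int) : String :=
  PySem.Str.join "\n" (pvALoop hits max_chars [] 0)

-- ===== PORT B =====
-- B: pass 1 builds every candidate piece; pass 2 counts the leading pieces whose
-- running prefix sum of lengths stays within max_chars; join that prefix.
def pvBPieces (hits : List (List (String × String))) : List String :=
  hits.filterMap (fun h =>
    let t := PySem.Str.strip ((PySem.Dict.mk h).getD "text" "")
    if t = "" then none else some ("- " ++ t))

-- the accumulate-and-count loop: running = prefix sum so far, counts fitting leading pieces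
def pvBCutoff (pieces : List String) (running : Int) (mc : Int) : Nat :=
  match pieces with
  | [] => 0
  | p :: ps =>
    let total := running + (PySem.Str.len p : Int)
    if total > mc then 0 else 1 + pvBCutoff ps total mc

def make_context_from_hits_alt (hits : List (List (String × String))) (max_chars : Int) : String :=
  let pieces := pvBPieces hits
  PySem.Str.join "\n" (pieces.take (pvBCutoff pieces 0 max_chars))

-- ===== PRECONDITION & SPEC =====
def Spec_make_context_from_hits (hits : List (List (String × String))) (max_chars : Int) (out : String) : Prop := out = make_context_from_hits_alt hits max_chars
instance (hits : List (List (String × String))) (max_chars : Int) (out : String) : Decidable (Spec_make_context_from_hits hits max_chars out) := by unfold Spec_make_context_from_hits; infer_instance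

-- ===== CLAIM (what is proved, stated in full; the proofs are below) =====
def Claim_equal_make_context_from_hits : Prop := ∀ (hits : List (List (String × String))) (max_chars : Int), Dom_make_context_from_hits hits max_chars → Spec_make_context_from_hits hits max_chars (make_context_from_hits hits max_chars)

-- ===== LEMMAS AND PROOFS =====
-- A's loop from any state (chunks, total) appends exactly the fitting prefix of B's pieces.
lemma pvALoop_eq (hits : List (List (String × String))) (mc : Int) :
    ∀ (chunks : List String) (total : Int),
      pvALoop hits mc chunks total
        = chunks ++ (pvBPieces hits).take (pvBCutoff (pvBPieces hits) total mc) := by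
  induction hits with
  | nil => intro chunks total; simp [pvALoop, pvBPieces]
  | cons h rest ih =>
    intro chunks total
    by_cases ht : PySem.Str.strip ((PySem.Dict.mk h).getD "text" "") = ""
    · simp [pvALoop, pvBPieces, ht, ih]
    · simp [pvALoop, pvBPieces, pvBCutoff, ht, ih]
      split_ifs with h1
      · simp
      · rw [Nat.add_comm, List.take_succ_cons]

-- ===== VERDICT (by name: the statement is the Claim_ definition above) =====
theorem make_context_from_hits_spec : Claim_equal_make_context_from_hits := by
  intro hits max_chars _
  unfold Spec_make_context_from_hits make_context_from_hits make_context_from_hits_alt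
  rw [pvALoop_eq hits max_chars [] 0]
  simp
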